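-- pv_equiv track=rewrite | github.com/suvarna192/ML_ChatBot | num_word.py | convert_to_indian_rupees
-- ===== SOURCE A (Python) =====
-- def convert_to_indian_rupees(number):
--     # Indian numbering system
--     indian_number_system = {
--         0: 'Zero',
--         1: 'One',
--         2: 'Two',
--         3: 'Three',
--         4: 'Four',
--         5: 'Five',
--         6: 'Six',
--         7: 'Seven',
--         8: 'Eight',
--         9: 'Nine',
--         10: 'Ten',
--         11: 'Eleven',
--         12: 'Twelve',
--         13: 'Thirteen',
--         14: 'Fourteen',
--         15: 'Fifteen',
--         16: 'Sixteen',
--         17: 'Seventeen',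
--         18: 'Eighteen',
--         19: 'Nineteen',
--         20: 'Twenty',
--         30: 'Thirty',
--         40: 'Forty',
--         50: 'Fifty',
--         60: 'Sixty',
--         70: 'Seventy',
--         80: 'Eighty',
--         90: 'Ninety'
--     }
--
--     if number < 20:
--         return indian_number_system[number]
--
--     result = ''
--
--     if number >= 10000000:
--         crores = number // 10000000
--         if crores > 0:
--             result += convert_to_indian_rupees(crores) + ' Crore '
--         number %= 10000000
--
--     if number >= 100000:
--         lakhs = number // 100000
--         if lakhs > 0:
--             result += convert_to_indian_rupees(lakhs) + ' Lakh '
--         number %= 100000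
--
--     if number >= 1000:
--         thousands = number // 1000
--         if thousands > 0:
--             result += convert_to_indian_rupees(thousands) + ' Thousand '
--         number %= 1000
--
--     if number >= 100:
--         hundreds = number // 100
--         if hundreds > 0:
--             result += convert_to_indian_rupees(hundreds) + ' Hundred '
--         number %= 100
--
--     if number > 0:
--         if result != '':
--             result += 'and '
--         if number < 20:
--             result += indian_number_system[number]
--         else:
--             result += indian_number_system[number // 10 * 10] + ' ' + indian_number_system[number % 10]
--
--     return result.strip().replace(" Zero", "")
-- ===== SOURCE B (Python) =====
-- # Non-recursive re-implementation: emit word tokens for the five Indian digit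
-- # groups (crore / lakh / thousand / hundred / units) in one flat pass and join
-- # them once; valid for amounts below 1000 Crore (covers the 32-bit range).
-- _UNITS = ['Zero', 'One', 'Two', 'Three', 'Four', 'Five', 'Six', 'Seven',
--           'Eight', 'Nine', 'Ten', 'Eleven', 'Twelve', 'Thirteen', 'Fourteen',
--           'Fifteen', 'Sixteen', 'Seventeen', 'Eighteen', 'Nineteen']
-- _TENS = ['', '', 'Twenty', 'Thirty', 'Forty', 'Fifty', 'Sixty', 'Seventy',
--          'Eighty', 'Ninety']
--
--
-- def _pair(n):
--     # word tokens for 0 <= n < 100 ([] for 0)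
--     if n == 0:
--         return []
--     if n < 20:
--         return [_UNITS[n]]
--     t, u = divmod(n, 10)
--     if u:
--         return [_TENS[t], _UNITS[u]]
--     return [_TENS[t]]
--
--
-- def convert_to_indian_rupees(number):
--     if number < 20:
--         return _UNITS[number]
--     crore = number // 10000000
--     lakh = number // 100000 % 100
--     thousand = number // 1000 % 100
--     hundred = number // 100 % 10
--     rest = number % 100
--     words = []
--     if crore:
--         ch, c2 = divmod(crore, 100)
--         if ch:
--             words.append(_UNITS[ch])
--             words.append('Hundred')
--             if c2:
--                 words.append('and')
--         words += _pair(c2)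
--         words.append('Crore')
--     if lakh:
--         words += _pair(lakh)
--         words.append('Lakh')
--     if thousand:
--         words += _pair(thousand)
--         words.append('Thousand')
--     if hundred:
--         words.append(_UNITS[hundred])
--         words.append('Hundred')
--     if rest:
--         if words:
--             words.append('and')
--         words += _pair(rest)
--     return ' '.join(words)
-- ===== Notes on version B (the rewrite author's own statement) =====
-- stated objective: simpler
-- what changed: Replaces A's recursive descent with string accumulation, trailing-space strip() and the replace(' Zero','') scrub by a single non-recursive pass that reads the five Indian digit groups (crore/lakh/thousand/hundred/units) with div/mod, emits word tokens into one flat list (never producing a Zero word), and joins them once.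
import Mathlib
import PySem

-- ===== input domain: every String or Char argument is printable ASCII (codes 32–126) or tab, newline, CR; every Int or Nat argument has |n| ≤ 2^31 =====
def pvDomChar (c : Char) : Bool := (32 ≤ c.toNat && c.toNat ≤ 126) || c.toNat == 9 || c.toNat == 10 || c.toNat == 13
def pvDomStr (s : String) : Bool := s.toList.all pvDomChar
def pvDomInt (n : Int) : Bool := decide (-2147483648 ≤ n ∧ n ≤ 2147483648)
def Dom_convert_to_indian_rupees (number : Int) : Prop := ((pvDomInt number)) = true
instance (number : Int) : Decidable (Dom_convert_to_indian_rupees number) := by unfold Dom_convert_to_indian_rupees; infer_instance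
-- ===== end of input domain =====

-- B replaces A's recursive descent with string accumulation, trailing-space strip() and the
-- replace(" Zero","") scrub by one non-recursive pass that reads the five Indian digit groups
-- with div/mod, emits word tokens into a flat list and joins them once (simpler; no speed claim).

-- ===== PORT A =====
-- the literal `indian_number_system` dict
def pvIndianDict : PySem.Dict Int String := PySem.Dict.ofList
  [(0, "Zero"), (1, "One"), (2, "Two"), (3, "Three"), (4, "Four"), (5, "Five"), (6, "Six"),
   (7, "Seven"), (8, "Eight"), (9, "Nine"), (10, "Ten"), (11, "Eleven"), (12, "Twelve"),
   (13, "Thirteen"), (14, "Fourteen"), (15, "Fifteen"), (16, "Sixteen"), (17, "Seventeen"),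
   (18, "Eighteen"), (19, "Nineteen"), (20, "Twenty"), (30, "Thirty"), (40, "Forty"),
   (50, "Fifty"), (60, "Sixty"), (70, "Seventy"), (80, "Eighty"), (90, "Ninety")]

-- `indian_number_system[k]`; a missing key is a KeyError in Python (excluded by Pre_)
def pvLookupA (k : Int) : String := (PySem.Dict.get? pvIndianDict k).getD ""

-- termination facts cited by name in the port's decreasing_by
lemma pvTermDiv (x d : Int) (h2 : 2 ≤ d) (hd : d ≤ x) : (PySem.Int.floordiv x d).toNat < x.toNat := by
  have h0 : (0:Int) < d := lt_of_lt_of_le zero_lt_two h2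
  have hx : (0:Int) < x := lt_of_lt_of_le h0 hd
  rw [PySem.Int.floordiv_eq_ediv_of_pos h0]
  exact (Int.toNat_lt_toNat hx).mpr ((Int.ediv_lt_iff_lt_mul h0).mpr
    ((lt_mul_iff_one_lt_right hx).mpr (lt_of_lt_of_le one_lt_two h2)))

lemma pvTermIte (x k : Int) (c : Prop) [Decidable c] (hk : 0 < k) (hc : c → k ≤ x) :
    (if c then PySem.Int.mod x k else x) ≤ x := by
  split_ifs with h
  · exact le_trans (le_of_lt (PySem.Int.mod_lt x hk)) (hc h)
  · exact le_refl x

lemma pvTermStep (X y d : Int) (h2 : 2 ≤ d) (hd : d ≤ y) (hyx : y ≤ X) :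
    (PySem.Int.floordiv y d).toNat < X.toNat :=
  lt_of_lt_of_le (pvTermDiv y d h2 hd) (Int.toNat_le_toNat hyx)

def convert_to_indian_rupees (number : Int) : String :=
  if number < 20 then pvLookupA number
  else
    let result0 : String := ""
    let result1 := if _h1 : 10000000 ≤ number then
        (let crores := PySem.Int.floordiv number 10000000
         if 0 < crores then result0 ++ convert_to_indian_rupees crores ++ " Crore " else result0)
      else result0
    let number1 := if 10000000 ≤ number then PySem.Int.mod number 10000000 else number
    let result2 := if _h2 : 100000 ≤ number1 then
        (let lakhs := PySem.Int.floordiv number1 100000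
         if 0 < lakhs then result1 ++ convert_to_indian_rupees lakhs ++ " Lakh " else result1)
      else result1
    let number2 := if 100000 ≤ number1 then PySem.Int.mod number1 100000 else number1
    let result3 := if _h3 : 1000 ≤ number2 then
        (let thousands := PySem.Int.floordiv number2 1000
         if 0 < thousands then result2 ++ convert_to_indian_rupees thousands ++ " Thousand " else result2)
      else result2
    let number3 := if 1000 ≤ number2 then PySem.Int.mod number2 1000 else number2
    let result4 := if _h4 : 100 ≤ number3 then
        (let hundreds := PySem.Int.floordiv number3 100
         if 0 < hundreds then result3 ++ convert_to_indian_rupees hundreds ++ " Hundred " else result3)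
      else result3
    let number4 := if 100 ≤ number3 then PySem.Int.mod number3 100 else number3
    let result5 := if 0 < number4 then
        (if result4 ≠ "" then result4 ++ "and " else result4) ++
        (if number4 < 20 then pvLookupA number4
         else pvLookupA (PySem.Int.floordiv number4 10 * 10) ++ " " ++ pvLookupA (PySem.Int.mod number4 10))
      else result4
    PySem.Str.replace (PySem.Str.strip result5) " Zero" ""
termination_by number.toNat
decreasing_by
  · exact pvTermDiv number 10000000 (by decide) (by assumption)
  · exact pvTermStep number _ 100000 (by decide) (by assumption)
      (pvTermIte number 10000000 _ (by decide) (fun h => h))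
  · exact pvTermStep number _ 1000 (by decide) (by assumption)
      (le_trans (pvTermIte _ 100000 _ (by decide) (fun h => h))
        (pvTermIte number 10000000 _ (by decide) (fun h => h)))
  · exact pvTermStep number _ 100 (by decide) (by assumption)
      (le_trans (pvTermIte _ 1000 _ (by decide) (fun h => h))
        (le_trans (pvTermIte _ 100000 _ (by decide) (fun h => h))
          (pvTermIte number 10000000 _ (by decide) (fun h => h))))

-- ===== PORT B =====
def pvUnits : List String :=
  ["Zero", "One", "Two", "Three", "Four", "Five", "Six", "Seven", "Eight", "Nine", "Ten",
   "Eleven", "Twelve", "Thirteen", "Fourteen", "Fifteen", "Sixteen", "Seventeen", "Eighteen",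
   "Nineteen"]

def pvTens : List String :=
  ["", "", "Twenty", "Thirty", "Forty", "Fifty", "Sixty", "Seventy", "Eighty", "Ninety"]

-- Source B's `_pair`: word tokens for one two-digit group
def pvPair (n : Int) : List String :=
  if n == 0 then []
  else if n < 20 then [(PySem.List.pyGet? pvUnits n).getD ""]
  else
    let t := PySem.Int.floordiv n 10
    let u := PySem.Int.mod n 10
    if u ≠ 0 then [(PySem.List.pyGet? pvTens t).getD "", (PySem.List.pyGet? pvUnits u).getD ""]
    else [(PySem.List.pyGet? pvTens t).getD ""]

def convert_to_indian_rupees_alt (number : Int) : String :=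
  if number < 20 then (PySem.List.pyGet? pvUnits number).getD ""
  else
    let crore := PySem.Int.floordiv number 10000000
    let lakh := PySem.Int.mod (PySem.Int.floordiv number 100000) 100
    let thousand := PySem.Int.mod (PySem.Int.floordiv number 1000) 100
    let hundred := PySem.Int.mod (PySem.Int.floordiv number 100) 10
    let rest := PySem.Int.mod number 100
    let w1 : List String :=
      if crore ≠ 0 then
        (let ch := PySem.Int.floordiv crore 100
         let c2 := PySem.Int.mod crore 100
         (if ch ≠ 0 then
            [(PySem.List.pyGet? pvUnits ch).getD "", "Hundred"] ++ (if c2 ≠ 0 then ["and"] else [])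
          else []) ++ pvPair c2 ++ ["Crore"])
      else []
    let w2 := w1 ++ (if lakh ≠ 0 then pvPair lakh ++ ["Lakh"] else [])
    let w3 := w2 ++ (if thousand ≠ 0 then pvPair thousand ++ ["Thousand"] else [])
    let w4 := w3 ++ (if hundred ≠ 0 then [(PySem.List.pyGet? pvUnits hundred).getD "", "Hundred"] else [])
    let words := if rest ≠ 0 then (if w4 ≠ [] then w4 ++ ["and"] else w4) ++ pvPair rest else w4
    PySem.Str.join " " words

-- ===== PRECONDITION & SPEC =====
-- Pre_ excludes exactly the negative inputs, on which A raises KeyError.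
def Pre_convert_to_indian_rupees (number : Int) : Prop := 0 ≤ number
instance (number : Int) : Decidable (Pre_convert_to_indian_rupees number) := by
  unfold Pre_convert_to_indian_rupees; infer_instance

def pvWitness_convert_to_indian_rupees : Int := 123456

def Spec_convert_to_indian_rupees (number : Int) (out : String) : Prop :=
  out = convert_to_indian_rupees_alt number
instance (number : Int) (out : String) : Decidable (Spec_convert_to_indian_rupees number out) := by
  unfold Spec_convert_to_indian_rupees; infer_instance

-- ===== CLAIM (what is proved, stated in full; the proofs are below) =====
def Claim_equal_convert_to_indian_rupees : Prop :=
  ∀ (number : Int), Dom_convert_to_indian_rupees number →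
    Pre_convert_to_indian_rupees number →
    Spec_convert_to_indian_rupees number (convert_to_indian_rupees number)

-- ===== LEMMAS AND PROOFS =====

-- word table on the Nat side (shared characterization of both ports' lookups)
def pvW (c : Nat) : List Char :=
  (match c with
   | 0 => "Zero" | 1 => "One" | 2 => "Two" | 3 => "Three" | 4 => "Four"
   | 5 => "Five" | 6 => "Six" | 7 => "Seven" | 8 => "Eight" | 9 => "Nine"
   | 10 => "Ten" | 11 => "Eleven" | 12 => "Twelve" | 13 => "Thirteen" | 14 => "Fourteen"
   | 15 => "Fifteen" | 16 => "Sixteen" | 17 => "Seventeen" | 18 => "Eighteen" | 19 => "Nineteen"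
   | 20 => "Twenty" | 30 => "Thirty" | 40 => "Forty" | 50 => "Fifty" | 60 => "Sixty"
   | 70 => "Seventy" | 80 => "Eighty" | 90 => "Ninety" | _ => "" : String).toList

def pvPat : List Char := [' ', 'Z', 'e', 'r', 'o']

def pvSmallA (c : Nat) : List Char :=
  if c < 20 then pvW c else pvW (c / 10 * 10) ++ ' ' :: pvW (c % 10)

def pvSmallB (c : Nat) : List Char :=
  if c < 20 then pvW c
  else if c % 10 ≠ 0 then pvW (c / 10 * 10) ++ ' ' :: pvW (c % 10)
  else pvW (c / 10 * 10)

def pvChQ (n : Nat) : List (Nat × List Char) :=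
  (if 10000000 ≤ n then [(n / 10000000, "Crore".toList)] else []) ++
  (if 100000 ≤ n % 10000000 then [(n % 10000000 / 100000, "Lakh".toList)] else []) ++
  (if 1000 ≤ n % 100000 then [(n % 100000 / 1000, "Thousand".toList)] else []) ++
  (if 100 ≤ n % 1000 then [(n % 1000 / 100, "Hundred".toList)] else [])

def pvFlat (ps : List (List Char)) : List Char := (ps.map (· ++ [' '])).flatten
def pvJoin (ps : List (List Char)) : List Char := PySem.Chars.join [' '] ps

def pvTailA (n : Nat) : List Char :=
  if n % 100 ≠ 0 then
    (if pvChQ n = [] then [] else "and ".toList) ++ pvSmallA (n % 100)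
  else []

def okL : List Char → Bool
  | [] => false
  | c :: _ => !PySem.Chars.isspace c

def okR (l : List Char) : Bool :=
  match l.getLast? with
  | none => false
  | some c => !PySem.Chars.isspace c

def noZ (l : List Char) : Bool := !(l.contains 'Z')

-- ---- lookup characterizations ----
set_option maxRecDepth 40000 in
lemma pvLookupA_eq : ∀ c : Fin 100, (pvLookupA ((c : Nat) : Int)).toList = pvW c := by decide

lemma pvLookupA_eq' (c : Nat) (h : c < 100) : (pvLookupA (c : Int)).toList = pvW c :=
  pvLookupA_eq ⟨c, h⟩

set_option maxRecDepth 40000 in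
lemma pvUnits_eq : ∀ c : Fin 20, ((PySem.List.pyGet? pvUnits ((c : Nat) : Int)).getD "").toList = pvW c := by decide

lemma pvUnits_eq' (c : Nat) (h : c < 20) : ((PySem.List.pyGet? pvUnits (c : Int)).getD "").toList = pvW c :=
  pvUnits_eq ⟨c, h⟩

-- toList facts for the string literals involved
lemma pvTLspace : (" " : String).toList = [' '] := by decide
lemma pvTLand : ("and " : String).toList = ['a', 'n', 'd', ' '] := by decide
lemma pvTLzero : (" Zero" : String).toList = pvPat := by decide
lemma pvTLempty : ("" : String).toList = [] := by decide
lemma pvTLcrore : (" Crore " : String).toList = ' ' :: ("Crore" : String).toList ++ [' '] := by decide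
lemma pvTLlakh : (" Lakh " : String).toList = ' ' :: ("Lakh" : String).toList ++ [' '] := by decide
lemma pvTLthousand : (" Thousand " : String).toList = ' ' :: ("Thousand" : String).toList ++ [' '] := by decide
lemma pvTLhundred : (" Hundred " : String).toList = ' ' :: ("Hundred" : String).toList ++ [' '] := by decide

lemma pvAppend_ne_empty (st w : String) (hw : w.toList ≠ []) : st ++ w ≠ "" := by
  intro hcon
  have h2 := congrArg String.toList hcon
  rw [String.toList_append, pvTLempty] at h2
  exact hw (List.append_eq_nil_iff.mp h2).2

lemma pvNeCrore (st : String) : (st ++ " Crore ") ≠ "" := pvAppend_ne_empty _ _ (by decide)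
lemma pvNeLakh (st : String) : (st ++ " Lakh ") ≠ "" := pvAppend_ne_empty _ _ (by decide)
lemma pvNeThousand (st : String) : (st ++ " Thousand ") ≠ "" := pvAppend_ne_empty _ _ (by decide)
lemma pvNeHundred (st : String) : (st ++ " Hundred ") ≠ "" := pvAppend_ne_empty _ _ (by decide)

lemma pvSmallA_norm (n : Nat) :
    (if n % 100 < 20 then (pvLookupA ((n : Int) % 100)).toList
     else (pvLookupA ((n : Int) % 100 / 10 * 10)).toList ++ ' ' :: (pvLookupA ((n : Int) % 10)).toList)
    = pvSmallA (n % 100) := by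
  unfold pvSmallA
  have k100 : ((n : Int) % 100) = ((n % 100 : Nat) : Int) := by push_cast; ring
  have kt : ((n : Int) % 100 / 10 * 10) = ((n % 100 / 10 * 10 : Nat) : Int) := by push_cast; ring
  have ku : ((n : Int) % 10) = ((n % 100 % 10 : Nat) : Int) := by push_cast; omega
  rw [ku, kt, k100]
  by_cases h5 : n % 100 < 20
  · rw [if_pos h5, if_pos h5, pvLookupA_eq' _ (by omega)]
  · rw [if_neg h5, if_neg h5, pvLookupA_eq' (n % 100 / 10 * 10) (by omega),
      pvLookupA_eq' (n % 100 % 10) (by omega)]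

-- ---- structural characterization of port A for n ≥ 20 ----
set_option maxHeartbeats 4000000 in
lemma pvLemA (n : Nat) (h : 20 ≤ n) :
    (convert_to_indian_rupees (n : Int)).toList =
      PySem.Chars.replace
        (PySem.Chars.strip
          (pvFlat ((pvChQ n).map fun p => (convert_to_indian_rupees ((p.1 : Nat) : Int)).toList ++ ' ' :: p.2)
            ++ pvTailA n))
        pvPat [] := by
  have h20 : ¬ ((n : Int) < 20) := by push_cast; omega
  rw [convert_to_indian_rupees.eq_def, if_neg h20]
  simp only [dite_eq_ite]
  simp only [show ((10000000 : Int) ≤ (n : Int)) ↔ (10000000 ≤ n) from by exact_mod_cast Iff.rfl]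
  have e7 : PySem.Int.floordiv (n : Int) 10000000 = ((n / 10000000 : Nat) : Int) := by
    rw [PySem.Int.floordiv_eq_ediv_of_pos (by norm_num)]; norm_cast
  have m7 : PySem.Int.mod (n : Int) 10000000 = ((n % 10000000 : Nat) : Int) := by
    rw [PySem.Int.mod_eq_emod_of_pos (by norm_num)]; norm_cast
  rw [e7, m7]
  simp only [show ((0 : Int) < ((n / 10000000 : Nat) : Int)) ↔ (10000000 ≤ n) from by
    rw [Int.natCast_pos]; omega]
  rw [show (if 10000000 ≤ n then ((n % 10000000 : Nat) : Int) else ((n : Nat) : Int)) =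
      ((n % 10000000 : Nat) : Int) from by
    split_ifs with hh
    · rfl
    · norm_cast; omega]
  simp only [show ((100000 : Int) ≤ ((n % 10000000 : Nat) : Int)) ↔ (100000 ≤ n % 10000000) from
    by exact_mod_cast Iff.rfl]
  have e5 : PySem.Int.floordiv ((n % 10000000 : Nat) : Int) 100000 = ((n % 10000000 / 100000 : Nat) : Int) := by
    rw [PySem.Int.floordiv_eq_ediv_of_pos (by norm_num)]; norm_cast
  have m5 : PySem.Int.mod ((n % 10000000 : Nat) : Int) 100000 = ((n % 100000 : Nat) : Int) := by
    rw [PySem.Int.mod_eq_emod_of_pos (by norm_num)]; norm_cast; omega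
  rw [e5, m5]
  simp only [show ((0 : Int) < ((n % 10000000 / 100000 : Nat) : Int)) ↔ (100000 ≤ n % 10000000) from
    by rw [Int.natCast_pos]; omega]
  rw [show (if 100000 ≤ n % 10000000 then ((n % 100000 : Nat) : Int) else ((n % 10000000 : Nat) : Int)) =
      ((n % 100000 : Nat) : Int) from by
    split_ifs with hh
    · rfl
    · norm_cast; omega]
  simp only [show ((1000 : Int) ≤ ((n % 100000 : Nat) : Int)) ↔ (1000 ≤ n % 100000) from
    by exact_mod_cast Iff.rfl]
  have e3 : PySem.Int.floordiv ((n % 100000 : Nat) : Int) 1000 = ((n % 100000 / 1000 : Nat) : Int) := by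
    rw [PySem.Int.floordiv_eq_ediv_of_pos (by norm_num)]; norm_cast
  have m3 : PySem.Int.mod ((n % 100000 : Nat) : Int) 1000 = ((n % 1000 : Nat) : Int) := by
    rw [PySem.Int.mod_eq_emod_of_pos (by norm_num)]; norm_cast; omega
  rw [e3, m3]
  simp only [show ((0 : Int) < ((n % 100000 / 1000 : Nat) : Int)) ↔ (1000 ≤ n % 100000) from
    by rw [Int.natCast_pos]; omega]
  rw [show (if 1000 ≤ n % 100000 then ((n % 1000 : Nat) : Int) else ((n % 100000 : Nat) : Int)) =
      ((n % 1000 : Nat) : Int) from by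
    split_ifs with hh
    · rfl
    · norm_cast; omega]
  simp only [show ((100 : Int) ≤ ((n % 1000 : Nat) : Int)) ↔ (100 ≤ n % 1000) from
    by exact_mod_cast Iff.rfl]
  have e2 : PySem.Int.floordiv ((n % 1000 : Nat) : Int) 100 = ((n % 1000 / 100 : Nat) : Int) := by
    rw [PySem.Int.floordiv_eq_ediv_of_pos (by norm_num)]; norm_cast
  have m2 : PySem.Int.mod ((n % 1000 : Nat) : Int) 100 = ((n % 100 : Nat) : Int) := by
    rw [PySem.Int.mod_eq_emod_of_pos (by norm_num)]; norm_cast; omega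
  rw [e2, m2]
  simp only [show ((0 : Int) < ((n % 1000 / 100 : Nat) : Int)) ↔ (100 ≤ n % 1000) from by
    rw [Int.natCast_pos]; omega]
  rw [show (if 100 ≤ n % 1000 then ((n % 100 : Nat) : Int) else ((n % 1000 : Nat) : Int)) =
      ((n % 100 : Nat) : Int) from by
    split_ifs with hh
    · rfl
    · norm_cast; omega]
  simp only [show ((0 : Int) < ((n % 100 : Nat) : Int)) ↔ (¬ (n % 100 = 0)) from by
    rw [Int.natCast_pos]; omega]
  simp only [show (((n % 100 : Nat) : Int) < 20) ↔ (n % 100 < 20) from by exact_mod_cast Iff.rfl]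
  have e1 : PySem.Int.floordiv ((n % 100 : Nat) : Int) 10 = ((n % 100 / 10 : Nat) : Int) := by
    rw [PySem.Int.floordiv_eq_ediv_of_pos (by norm_num)]; norm_cast
  have m1 : PySem.Int.mod ((n % 100 : Nat) : Int) 10 = ((n % 100 % 10 : Nat) : Int) := by
    rw [PySem.Int.mod_eq_emod_of_pos (by norm_num)]; norm_cast
  rw [e1, m1]
  rw [show ((n % 100 / 10 : Nat) : Int) * 10 = ((n % 100 / 10 * 10 : Nat) : Int) from by
    push_cast; ring]
  by_cases h1 : 10000000 ≤ n <;> by_cases h2 : 100000 ≤ n % 10000000 <;>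
    by_cases h3 : 1000 ≤ n % 100000 <;> by_cases h4 : 100 ≤ n % 1000 <;>
    by_cases hc0 : n % 100 = 0 <;>
    simp [pvChQ, pvFlat, pvTailA, h1, h2, h3, h4, hc0,
      PySem.Str.toList_replace, PySem.Str.toList_strip, String.toList_append,
      apply_ite String.toList, pvTLspace, pvTLand, pvTLzero, pvTLempty,
      pvTLcrore, pvTLlakh, pvTLthousand, pvTLhundred,
      pvNeCrore, pvNeLakh, pvNeThousand, pvNeHundred,
      pvSmallA_norm n]

-- ---- chunk facts ----
lemma pvChQ_mem (n : Nat) : ∀ q L, (q, L) ∈ pvChQ n →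
    1 ≤ q ∧ q < n ∧ (L = "Crore".toList ∨ L = "Lakh".toList ∨ L = "Thousand".toList ∨ L = "Hundred".toList) := by
  intro q L h
  unfold pvChQ at h
  rw [List.mem_append, List.mem_append, List.mem_append] at h
  have H : ∀ (cond : Prop) (inst : Decidable cond) (v : Nat × List Char),
      (q, L) ∈ (if cond then [v] else []) → cond ∧ q = v.1 ∧ L = v.2 := by
    intro cond inst v hm
    split_ifs at hm with hc
    · rcases List.mem_singleton.mp hm with he
      exact ⟨hc, congrArg Prod.fst he, congrArg Prod.snd he⟩
    · simp at hm
  rcases h with ((h | h) | h) | h <;>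
    obtain ⟨hc, rfl, rfl⟩ := H _ _ _ h
  · exact ⟨by omega, by omega, Or.inl rfl⟩
  · exact ⟨by omega, by omega, Or.inr (Or.inl rfl)⟩
  · exact ⟨by omega, by omega, Or.inr (Or.inr (Or.inl rfl))⟩
  · exact ⟨by omega, by omega, Or.inr (Or.inr (Or.inr rfl))⟩

lemma pvChQ_nil (n : Nat) (h : 20 ≤ n) (hnil : pvChQ n = []) : n % 100 = n := by
  unfold pvChQ at hnil
  split_ifs at hnil with h1 h2 h3 h4 <;> simp_all <;> omega

-- the canonical output (used only by the proofs, to meet both ports in the middle)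
def pvCanon (n : Nat) : List Char :=
  if n < 20 then pvW n
  else
    pvJoin (((pvChQ n).attach.map (fun p => pvCanon p.1.1 ++ ' ' :: p.1.2)) ++
      (if n % 100 ≠ 0 then
        [(if pvChQ n = [] then [] else "and ".toList) ++ pvSmallB (n % 100)] else []))
termination_by n
decreasing_by
  exact (pvChQ_mem n p.1.1 p.1.2 (by rw [Prod.mk.eta]; exact p.2)).2.1

lemma pvCanonAttach (l : List (Nat × List Char)) :
    l.attach.map (fun p => pvCanon p.1.1 ++ ' ' :: p.1.2)
      = l.map (fun p => pvCanon p.1 ++ ' ' :: p.2) := by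
  first
    | exact List.attach_map_val (l := l) (f := fun y => pvCanon y.1 ++ ' ' :: y.2)
    | exact @List.attach_map_val _ _ l (fun y => pvCanon y.1 ++ ' ' :: y.2)
    | exact @List.attach_map_val _ _ (fun y => pvCanon y.1 ++ ' ' :: y.2) l

lemma pvCanon_eq (n : Nat) (h : 20 ≤ n) :
    pvCanon n = pvJoin ((pvChQ n).map (fun p => pvCanon p.1 ++ ' ' :: p.2) ++
      (if n % 100 ≠ 0 then
        [(if pvChQ n = [] then [] else "and ".toList) ++ pvSmallB (n % 100)] else [])) := by
  rw [pvCanon.eq_def, if_neg (by omega), pvCanonAttach]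

lemma pvCanon_low (n : Nat) (h : n < 20) : pvCanon n = pvW n := by
  rw [pvCanon.eq_def, if_pos h]

-- ---- string-shape lemmas ----
lemma okL_append (x y : List Char) (h : okL x = true) : okL (x ++ y) = true := by
  cases x with
  | nil => simp [okL] at h
  | cons c t => simpa [okL] using h

lemma okR_append (x y : List Char) (h : okR y = true) : okR (x ++ y) = true := by
  rcases y.eq_nil_or_concat with rfl | ⟨sfx, c, rfl⟩
  · simp [okR] at h
  · unfold okR at h ⊢
    rw [List.concat_eq_append] at h ⊢
    rw [← List.append_assoc, List.getLast?_concat]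
    rwa [List.getLast?_concat] at h

lemma noZ_append (x y : List Char) (hx : noZ x = true) (hy : noZ y = true) : noZ (x ++ y) = true := by
  simp only [noZ, Bool.not_eq_eq_eq_not, Bool.not_true, List.contains_eq_mem,
    decide_eq_false_iff_not, List.mem_append] at *
  tauto

lemma pvLstrip_ok (l : List Char) (h1 : okL l = true) : PySem.Chars.lstrip l = l := by
  cases l with
  | nil => simp [okL] at h1
  | cons c t =>
    have hc : PySem.Chars.isspace c = false := by simpa [okL] using h1
    simp [PySem.Chars.lstrip, List.dropWhile_cons, hc]

lemma pvRstrip_ok (l : List Char) (h2 : okR l = true) : PySem.Chars.rstrip l = l := by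
  have hl : l ≠ [] := by rintro rfl; simp [okR] at h2
  obtain ⟨c', r, hr⟩ : ∃ c' r, l.reverse = c' :: r := by
    cases hrev : l.reverse with
    | nil => exact absurd (by simpa using congrArg List.reverse hrev) hl
    | cons a b => exact ⟨a, b, rfl⟩
  have hlast : l.getLast? = some c' := by rw [← List.head?_reverse, hr]; rfl
  have hc' : PySem.Chars.isspace c' = false := by
    unfold okR at h2; rw [hlast] at h2; simpa using h2
  unfold PySem.Chars.rstrip
  rw [hr, List.dropWhile_cons, hc']
  simp [← hr]

lemma pvRstrip_space (l : List Char) : PySem.Chars.rstrip (l ++ [' ']) = PySem.Chars.rstrip l := by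
  unfold PySem.Chars.rstrip
  rw [List.reverse_append]
  simp [List.dropWhile_cons, show PySem.Chars.isspace ' ' = true from rfl]

lemma pvStrip_ok (l : List Char) (h1 : okL l = true) (h2 : okR l = true) :
    PySem.Chars.strip l = l := by
  unfold PySem.Chars.strip
  rw [pvLstrip_ok l h1, pvRstrip_ok l h2]

lemma pvStrip_space (l : List Char) (h1 : okL l = true) (h2 : okR l = true) :
    PySem.Chars.strip (l ++ [' ']) = l := by
  unfold PySem.Chars.strip
  rw [pvLstrip_ok _ (okL_append l [' '] h1), pvRstrip_space, pvRstrip_ok l h2]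

lemma pvPat_not_prefix (c : Char) (t : List Char) (hZ : ∀ c2 ∈ t.head?, c2 ≠ 'Z') :
    pvPat.isPrefixOf (c :: t) = false := by
  cases t with
  | nil => simp [pvPat, List.isPrefixOf]
  | cons c2 t2 =>
    have h2 : c2 ≠ 'Z' := hZ c2 rfl
    simp [pvPat, List.isPrefixOf, Ne.symm h2]

lemma pv_go_noZ : ∀ (fuel : Nat) (l acc : List Char), noZ l = true →
    PySem.Chars.replace.go pvPat [] fuel l acc = acc.reverse ++ l := by
  intro fuel
  induction fuel with
  | zero => intro l acc _; simp [PySem.Chars.replace.go]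
  | succ f ih =>
    intro l acc hl
    cases l with
    | nil => simp [PySem.Chars.replace.go]
    | cons c t =>
      have hZ : 'Z' ∉ c :: t := by
        simpa [noZ, List.contains_eq_mem] using hl
      have hpre : pvPat.isPrefixOf (c :: t) = false := by
        refine pvPat_not_prefix c t ?_
        intro c2 hc2 hc2Z
        subst hc2Z
        cases t with
        | nil => simp at hc2
        | cons a b =>
          simp only [List.head?] at hc2
          exact hZ (by simp [Option.some_inj.mp hc2])
      have ht : noZ t = true := by
        simp only [noZ, List.contains_eq_mem, Bool.not_eq_eq_eq_not, Bool.not_true,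
          decide_eq_false_iff_not] at hl ⊢
        intro hmem; exact hl (List.mem_cons_of_mem _ hmem)
      rw [show PySem.Chars.replace.go pvPat [] (f + 1) (c :: t) acc =
          if pvPat.isPrefixOf (c :: t) = true then
            PySem.Chars.replace.go pvPat [] f (List.drop pvPat.length (c :: t)) ([].reverse ++ acc)
          else PySem.Chars.replace.go pvPat [] f t (c :: acc) from rfl]
      rw [hpre]
      simp only [Bool.false_eq_true, if_false]
      rw [ih t (c :: acc) ht]
      simp

lemma pv_go_pat : ∀ (l : List Char) (fuel : Nat) (acc : List Char), noZ l = true →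
    l.length + 1 ≤ fuel →
    PySem.Chars.replace.go pvPat [] fuel (l ++ pvPat) acc = acc.reverse ++ l := by
  intro l
  induction l with
  | nil =>
    intro fuel acc _ hf
    obtain ⟨f, rfl⟩ : ∃ f, fuel = f + 1 := ⟨fuel - 1, by omega⟩
    rw [show ([] : List Char) ++ pvPat = pvPat from rfl]
    rw [show PySem.Chars.replace.go pvPat [] (f + 1) pvPat acc =
        if pvPat.isPrefixOf pvPat = true then
          PySem.Chars.replace.go pvPat [] f (List.drop pvPat.length pvPat) ([].reverse ++ acc)
        else PySem.Chars.replace.go pvPat [] f ['Z','e','r','o'] (' ' :: acc) from rfl]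
    rw [show pvPat.isPrefixOf pvPat = true from by decide]
    simp only [if_true, List.reverse_nil, List.nil_append]
    rw [show List.drop pvPat.length pvPat = [] from by decide]
    cases f with
    | zero => simp [PySem.Chars.replace.go]
    | succ f' => simp [PySem.Chars.replace.go]
  | cons c t ih =>
    intro fuel acc hZ hf
    obtain ⟨f, rfl⟩ : ∃ f, fuel = f + 1 := ⟨fuel - 1, by omega⟩
    have hZc : 'Z' ∉ c :: t := by simpa [noZ, List.contains_eq_mem] using hZ
    have hpre : pvPat.isPrefixOf (c :: (t ++ pvPat)) = false := by
      refine pvPat_not_prefix c (t ++ pvPat) ?_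
      intro c2 hc2 hc2Z
      subst hc2Z
      cases t with
      | nil => simp [pvPat] at hc2
      | cons a b =>
        simp only [List.cons_append, List.head?] at hc2
        exact hZc (by simp [Option.some_inj.mp hc2])
    have ht : noZ t = true := by
      simp only [noZ, List.contains_eq_mem, Bool.not_eq_eq_eq_not, Bool.not_true,
        decide_eq_false_iff_not] at hZ ⊢
      intro hmem; exact hZ (List.mem_cons_of_mem _ hmem)
    rw [show (c :: t) ++ pvPat = c :: (t ++ pvPat) from rfl]
    rw [show PySem.Chars.replace.go pvPat [] (f + 1) (c :: (t ++ pvPat)) acc =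
        if pvPat.isPrefixOf (c :: (t ++ pvPat)) = true then
          PySem.Chars.replace.go pvPat [] f (List.drop pvPat.length (c :: (t ++ pvPat))) ([].reverse ++ acc)
        else PySem.Chars.replace.go pvPat [] f (t ++ pvPat) (c :: acc) from rfl]
    rw [hpre]
    simp only [Bool.false_eq_true, if_false]
    rw [ih f (c :: acc) ht (by simpa using Nat.succ_le_succ_iff.mp hf)]
    simp

lemma pvReplace_noZ (l : List Char) (h : noZ l = true) :
    PySem.Chars.replace l pvPat [] = l := by
  unfold PySem.Chars.replace
  rw [show pvPat.isEmpty = false from rfl]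
  simp only [Bool.false_eq_true, if_false]
  rw [pv_go_noZ l.length l [] h]
  rfl

lemma pvReplace_pat (l : List Char) (h : noZ l = true) :
    PySem.Chars.replace (l ++ pvPat) pvPat [] = l := by
  unfold PySem.Chars.replace
  rw [show pvPat.isEmpty = false from rfl]
  simp only [Bool.false_eq_true, if_false]
  rw [pv_go_pat l (l ++ pvPat).length [] h (by simp [pvPat])]
  rfl

-- ---- join/flatten lemmas ----
lemma pvJoin_append_singleton (ps : List (List Char)) (x : List Char) :
    pvJoin (ps ++ [x]) = (if ps = [] then [] else pvJoin ps ++ [' ']) ++ x := by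
  induction ps with
  | nil => simp [pvJoin, PySem.Chars.join_singleton]
  | cons p ps ih =>
    cases ps with
    | nil =>
      simp [pvJoin, PySem.Chars.join_cons_cons, PySem.Chars.join_singleton]
    | cons q rest =>
      have h1 : pvJoin ((p :: q :: rest) ++ [x]) = p ++ [' '] ++ pvJoin ((q :: rest) ++ [x]) := by
        simpa [pvJoin] using PySem.Chars.join_cons_cons [' '] p q (rest ++ [x])
      rw [h1, ih]
      simp [pvJoin, PySem.Chars.join_cons_cons, List.append_assoc]

lemma pvJoin_append (xs ys : List (List Char)) (hy : ys ≠ []) :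
    pvJoin (xs ++ ys) = (if xs = [] then [] else pvJoin xs ++ [' ']) ++ pvJoin ys := by
  induction xs with
  | nil => simp
  | cons p xs ih =>
    cases xs with
    | nil =>
      cases ys with
      | nil => exact absurd rfl hy
      | cons q rest =>
        simp [pvJoin, PySem.Chars.join_cons_cons, PySem.Chars.join_singleton]
    | cons q rest =>
      have h1 : pvJoin ((p :: q :: rest) ++ ys) = p ++ [' '] ++ pvJoin ((q :: rest) ++ ys) := by
        simpa [pvJoin] using PySem.Chars.join_cons_cons [' '] p q (rest ++ ys)
      rw [h1, ih]
      simp [pvJoin, PySem.Chars.join_cons_cons, List.append_assoc]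

lemma pvJoin_cons (x : List Char) (rest : List (List Char)) (h : rest ≠ []) :
    pvJoin (x :: rest) = x ++ ' ' :: pvJoin rest := by
  cases rest with
  | nil => exact absurd rfl h
  | cons q r => simp [pvJoin, PySem.Chars.join_cons_cons]

lemma pvJoin_flatten (gss : List (List (List Char))) (h : ∀ g ∈ gss, g ≠ []) :
    pvJoin gss.flatten = pvJoin (gss.map pvJoin) := by
  induction gss with
  | nil => simp
  | cons g gss ih =>
    have hg : g ≠ [] := h g (by simp)
    cases gss with
    | nil => simp [pvJoin, PySem.Chars.join_singleton]
    | cons a b =>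
      have ha : a ≠ [] := h a (by simp)
      have hfne : (a :: b).flatten ≠ [] := by
        cases a with
        | nil => exact absurd rfl ha
        | cons x y => simp
      have hmne : ((a :: b).map pvJoin) ≠ [] := by simp
      rw [List.flatten_cons, pvJoin_append g _ hfne, if_neg hg,
        ih (fun g' hg' => h g' (by simp [hg']))]
      rw [show List.map pvJoin (g :: a :: b) = pvJoin g :: List.map pvJoin (a :: b) from by simp,
        pvJoin_cons (pvJoin g) _ hmne]
      simp

lemma pvFlat_eq (ps : List (List Char)) (h : ps ≠ []) : pvFlat ps = pvJoin ps ++ [' '] := by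
  induction ps with
  | nil => simp at h
  | cons p ps ih =>
    cases ps with
    | nil => simp [pvFlat, pvJoin, PySem.Chars.join_singleton]
    | cons q rest =>
      have := ih (by simp)
      simp only [pvFlat, List.map_cons, List.flatten_cons] at this ⊢
      rw [this]
      have hj : pvJoin (p :: q :: rest) = p ++ [' '] ++ pvJoin (q :: rest) :=
        PySem.Chars.join_cons_cons [' '] p q rest
      rw [hj]
      simp [List.append_assoc]

lemma okL_join (ps : List (List Char)) (h : ps ≠ []) (hok : ∀ p ∈ ps, okL p = true) :
    okL (pvJoin ps) = true := by
  cases ps with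
  | nil => simp at h
  | cons p ps =>
    cases ps with
    | nil =>
      simpa [pvJoin, PySem.Chars.join_singleton] using hok p (by simp)
    | cons q rest =>
      rw [pvJoin, PySem.Chars.join_cons_cons]
      exact okL_append _ _ (okL_append _ _ (hok p (by simp)))

lemma okR_join (ps : List (List Char)) (h : ps ≠ []) (hok : ∀ p ∈ ps, okR p = true) :
    okR (pvJoin ps) = true := by
  induction ps with
  | nil => simp at h
  | cons p ps ih =>
    cases ps with
    | nil =>
      simpa [pvJoin, PySem.Chars.join_singleton] using hok p (by simp)
    | cons q rest =>
      rw [pvJoin, PySem.Chars.join_cons_cons]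
      exact okR_append _ _ (ih (by simp) (fun r hr => hok r (by simp [hr])))

lemma noZ_join (ps : List (List Char)) (hok : ∀ p ∈ ps, noZ p = true) :
    noZ (pvJoin ps) = true := by
  induction ps with
  | nil => decide
  | cons p ps ih =>
    cases ps with
    | nil =>
      simpa [pvJoin, PySem.Chars.join_singleton] using hok p (by simp)
    | cons q rest =>
      rw [pvJoin, PySem.Chars.join_cons_cons]
      exact noZ_append _ _ (noZ_append _ _ (hok p (by simp)) (by decide))
        (ih (fun r hr => hok r (by simp [hr])))

-- small-chunk word facts (finite checks)
set_option maxRecDepth 40000 in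
lemma pvSmallB_ok : ∀ c : Fin 100, (c : Nat) ≠ 0 →
    okL (pvSmallB c) = true ∧ okR (pvSmallB c) = true ∧ noZ (pvSmallB c) = true := by decide

set_option maxRecDepth 40000 in
lemma pvSmallA_eq_B : ∀ c : Fin 100,
    pvSmallA c = pvSmallB c ++ (if 20 ≤ (c : Nat) ∧ (c : Nat) % 10 = 0 then pvPat else []) := by decide

-- ---- the bridge (A's strip/replace form equals the joined canonical form) ----
lemma pvBridge (ps : List (List Char)) (c : Nat) (ad : List Char) (hc : c < 100)
    (had : ad = if ps = [] then [] else "and ".toList)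
    (hne : ps = [] → c ≠ 0)
    (hok : ∀ p ∈ ps, okL p = true ∧ okR p = true ∧ noZ p = true) :
    PySem.Chars.replace
        (PySem.Chars.strip (pvFlat ps ++ (if c ≠ 0 then ad ++ pvSmallA c else [])))
        pvPat []
      = pvJoin (ps ++ (if c ≠ 0 then [ad ++ pvSmallB c] else [])) := by
  have hokL : ∀ p ∈ ps, okL p = true := fun p hp => (hok p hp).1
  have hokR : ∀ p ∈ ps, okR p = true := fun p hp => (hok p hp).2.1
  have hnoZ : ∀ p ∈ ps, noZ p = true := fun p hp => (hok p hp).2.2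
  by_cases hc0 : c = 0
  · have hps : ps ≠ [] := fun hnil => (hne hnil) hc0
    rw [if_neg (by simpa using hc0), if_neg (by simpa using hc0), List.append_nil,
      List.append_nil, pvFlat_eq ps hps,
      pvStrip_space _ (okL_join ps hps hokL) (okR_join ps hps hokR),
      pvReplace_noZ _ (noZ_join ps hnoZ)]
  · rw [if_pos hc0, if_pos hc0]
    obtain ⟨sL, sR, sZ⟩ :
        okL (pvSmallB c) = true ∧ okR (pvSmallB c) = true ∧ noZ (pvSmallB c) = true :=
      pvSmallB_ok ⟨c, hc⟩ hc0
    have hA : pvSmallA c = pvSmallB c ++ (if 20 ≤ c ∧ c % 10 = 0 then pvPat else []) :=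
      pvSmallA_eq_B ⟨c, hc⟩
    have hadL : okL (ad ++ pvSmallB c) = true := by
      rcases eq_or_ne ps [] with rfl | hps
      · rw [had]; simpa using sL
      · rw [had, if_neg hps]; exact okL_append _ _ (by decide)
    have hadR : okR (ad ++ pvSmallB c) = true := okR_append _ _ sR
    have hadZ : noZ (ad ++ pvSmallB c) = true := by
      rcases eq_or_ne ps [] with rfl | hps
      · rw [had]; simpa using sZ
      · rw [had, if_neg hps]; exact noZ_append _ _ (by decide) sZ
    have hXL : okL (pvJoin (ps ++ [ad ++ pvSmallB c])) = true := by
      refine okL_join _ (by simp) ?_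
      intro p hp
      rcases List.mem_append.mp hp with hp' | hp'
      · exact hokL p hp'
      · rw [List.mem_singleton.mp hp']; exact hadL
    have hXR : okR (pvJoin (ps ++ [ad ++ pvSmallB c])) = true := by
      refine okR_join _ (by simp) ?_
      intro p hp
      rcases List.mem_append.mp hp with hp' | hp'
      · exact hokR p hp'
      · rw [List.mem_singleton.mp hp']; exact hadR
    have hXZ : noZ (pvJoin (ps ++ [ad ++ pvSmallB c])) = true := by
      refine noZ_join _ ?_
      intro p hp
      rcases List.mem_append.mp hp with hp' | hp'
      · exact hnoZ p hp'
      · rw [List.mem_singleton.mp hp']; exact hadZ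
    have hkey : pvFlat ps ++ (ad ++ pvSmallA c) =
        pvJoin (ps ++ [ad ++ pvSmallB c]) ++ (if 20 ≤ c ∧ c % 10 = 0 then pvPat else []) := by
      rw [hA, pvJoin_append_singleton]
      rcases eq_or_ne ps [] with rfl | hps
      · rw [had]; simp [pvFlat]
      · rw [had, if_neg hps, if_neg hps, pvFlat_eq ps hps]
        simp [List.append_assoc]
    rw [hkey]
    by_cases hz : 20 ≤ c ∧ c % 10 = 0
    · rw [if_pos hz,
        pvStrip_ok _ (okL_append _ _ hXL) (okR_append _ _ (by decide))]
      exact pvReplace_pat _ hXZ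
    · rw [if_neg hz, List.append_nil, pvStrip_ok _ hXL hXR]
      exact pvReplace_noZ _ hXZ

-- tameness of the canonical outputs
lemma pvPartsOk (n : Nat)
    (htame : ∀ m : Nat, 1 ≤ m → m < n →
      okL (pvCanon m) = true ∧ okR (pvCanon m) = true ∧ noZ (pvCanon m) = true) :
    ∀ p ∈ (pvChQ n).map (fun p => pvCanon p.1 ++ ' ' :: p.2),
      okL p = true ∧ okR p = true ∧ noZ p = true := by
  intro p hp
  rw [List.mem_map] at hp
  obtain ⟨⟨q, L⟩, hq, rfl⟩ := hp
  obtain ⟨hq1, hq2, hL⟩ := pvChQ_mem n q L hq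
  obtain ⟨oL, oR, oZ⟩ := htame q hq1 hq2
  rcases hL with rfl | rfl | rfl | rfl <;> dsimp only <;>
    exact ⟨okL_append _ _ oL, okR_append _ _ (by decide), noZ_append _ _ oZ (by decide)⟩

lemma pvTameCanon : ∀ n : Nat, 1 ≤ n →
    okL (pvCanon n) = true ∧ okR (pvCanon n) = true ∧ noZ (pvCanon n) = true := by
  intro n
  induction n using Nat.strong_induction_on with
  | _ n ih =>
    intro hn1
    by_cases h20 : n < 20
    · rw [pvCanon_low n h20]
      interval_cases n <;> exact ⟨by decide, by decide, by decide⟩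
    · have hge : 20 ≤ n := by omega
      rw [pvCanon_eq n hge]
      have hPok := pvPartsOk n (fun m hm1 hm2 => ih m hm2 hm1)
      have htl : ∀ p ∈ (if n % 100 ≠ 0 then
            [(if pvChQ n = [] then [] else "and ".toList) ++ pvSmallB (n % 100)] else ([] : List (List Char))),
          okL p = true ∧ okR p = true ∧ noZ p = true := by
        intro p hp
        split_ifs at hp with hcc hq
        · simp only [List.mem_singleton] at hp
          subst hp
          obtain ⟨sL, sR, sZ⟩ :
              okL (pvSmallB (n % 100)) = true ∧ okR (pvSmallB (n % 100)) = true ∧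
                noZ (pvSmallB (n % 100)) = true :=
            pvSmallB_ok ⟨n % 100, by omega⟩ hcc
          exact ⟨by simpa using sL, by simpa using sR, by simpa using sZ⟩
        · simp only [List.mem_singleton] at hp
          subst hp
          obtain ⟨sL, sR, sZ⟩ :
              okL (pvSmallB (n % 100)) = true ∧ okR (pvSmallB (n % 100)) = true ∧
                noZ (pvSmallB (n % 100)) = true :=
            pvSmallB_ok ⟨n % 100, by omega⟩ hcc
          exact ⟨show okL ("and ".toList ++ pvSmallB (n % 100)) = true from okL_append _ _ (by decide),
            show okR ("and ".toList ++ pvSmallB (n % 100)) = true from okR_append _ _ sR,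
            show noZ ("and ".toList ++ pvSmallB (n % 100)) = true from noZ_append _ _ (by decide) sZ⟩
        · simp at hp
      have hne : ((pvChQ n).map (fun p => pvCanon p.1 ++ ' ' :: p.2)
          ++ (if n % 100 ≠ 0 then
            [(if pvChQ n = [] then [] else "and ".toList) ++ pvSmallB (n % 100)] else [])) ≠ [] := by
        by_cases hcc : n % 100 = 0
        · have hq : pvChQ n ≠ [] := fun hq => by have := pvChQ_nil n hge hq; omega
          simp [hcc, hq]
        · simp [hcc]
      refine ⟨okL_join _ hne ?_, okR_join _ hne ?_, noZ_join _ ?_⟩ <;> intro p hp <;>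
        rcases List.mem_append.mp hp with hp' | hp'
      · exact (hPok p hp').1
      · exact (htl p hp').1
      · exact (hPok p hp').2.1
      · exact (htl p hp').2.1
      · exact (hPok p hp').2.2
      · exact (htl p hp').2.2

-- A equals the canonical form everywhere on the naturals
lemma pvMain : ∀ n : Nat, (convert_to_indian_rupees (n : Int)).toList = pvCanon n := by
  intro n
  induction n using Nat.strong_induction_on with
  | _ n ih =>
    by_cases h20 : n < 20
    · have hi : (n : Int) < 20 := by exact_mod_cast h20
      rw [convert_to_indian_rupees.eq_def, if_pos hi, pvLookupA_eq' n (by omega),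
        pvCanon_low n h20]
    · have hge : 20 ≤ n := by omega
      rw [pvLemA n hge, pvCanon_eq n hge]
      have hmap : (pvChQ n).map (fun p => (convert_to_indian_rupees ((p.1 : Nat) : Int)).toList ++ ' ' :: p.2)
          = (pvChQ n).map (fun p => pvCanon p.1 ++ ' ' :: p.2) := by
        refine List.map_congr_left ?_
        rintro ⟨q, L⟩ hq
        obtain ⟨hq1, hq2, _⟩ := pvChQ_mem n q L hq
        simp only
        rw [ih q hq2]
      rw [hmap]
      have hc : n % 100 < 100 := by omega
      have hPSnil : ((pvChQ n).map (fun p => pvCanon p.1 ++ ' ' :: p.2) = [])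
          ↔ pvChQ n = [] := by simp
      have hne : ((pvChQ n).map (fun p => pvCanon p.1 ++ ' ' :: p.2) = [])
          → n % 100 ≠ 0 := by
        intro hnil h0
        have := pvChQ_nil n hge (hPSnil.mp hnil)
        omega
      have hok := pvPartsOk n (fun m hm1 _ => pvTameCanon m hm1)
      unfold pvTailA
      have had : (if pvChQ n = [] then ([] : List Char) else "and ".toList) =
          (if (pvChQ n).map (fun p => pvCanon p.1 ++ ' ' :: p.2) = []
           then [] else "and ".toList) := by
        by_cases hq : pvChQ n = []
        · rw [if_pos hq, if_pos (hPSnil.mpr hq)]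
        · rw [if_neg hq, if_neg (fun hh => hq (hPSnil.mp hh))]
      rw [had]
      exact pvBridge _ (n % 100) _ hc rfl hne hok

-- ===== B-side: the flat token pass equals the canonical form =====
def pvPairN (c : Nat) : List (List Char) :=
  if c = 0 then []
  else if c < 20 then [pvW c]
  else if c % 10 ≠ 0 then [pvW (c / 10 * 10), pvW (c % 10)]
  else [pvW (c / 10 * 10)]

set_option maxRecDepth 40000 in
lemma pvPair_toList : ∀ c : Fin 100, (pvPair ((c : Nat) : Int)).map String.toList = pvPairN c := by
  decide

lemma pvPair_toList' (c : Nat) (h : c < 100) :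
    (pvPair (c : Int)).map String.toList = pvPairN c := pvPair_toList ⟨c, h⟩

lemma pvPairN_ne (c : Nat) (h : c ≠ 0) : pvPairN c ≠ [] := by
  unfold pvPairN
  rw [if_neg h]
  split_ifs <;> simp

lemma pvJoin_pvPairN (c : Nat) (h0 : c ≠ 0) (h : c < 100) : pvJoin (pvPairN c) = pvSmallB c := by
  unfold pvPairN pvSmallB
  rw [if_neg h0]
  by_cases h20 : c < 20
  · rw [if_pos h20, if_pos h20]
    simp [pvJoin, PySem.Chars.join_singleton]
  · rw [if_neg h20, if_neg h20]
    by_cases hu : c % 10 ≠ 0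
    · rw [if_pos hu, if_pos hu]
      simp [pvJoin, PySem.Chars.join_cons_cons, PySem.Chars.join_singleton]
    · rw [if_neg hu, if_neg hu]
      simp [pvJoin, PySem.Chars.join_singleton]

lemma pvCanon_small (c : Nat) (h0 : 1 ≤ c) (h : c < 100) : pvCanon c = pvSmallB c := by
  by_cases h20 : c < 20
  · rw [pvCanon_low c h20]
    unfold pvSmallB
    rw [if_pos h20]
  · have hq : pvChQ c = [] := by
      unfold pvChQ
      rw [if_neg (by omega), if_neg (by omega), if_neg (by omega), if_neg (by omega)]
      rfl
    rw [pvCanon_eq c (by omega), hq]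
    have hcc : c % 100 = c := Nat.mod_eq_of_lt h
    simp [hcc, show c ≠ 0 by omega, pvJoin, PySem.Chars.join_singleton]

lemma pvCanon_mid (c : Nat) (h1 : 100 ≤ c) (h2 : c < 1000) :
    pvCanon c = pvW (c / 100) ++ ' ' :: "Hundred".toList ++
      (if c % 100 ≠ 0 then ' ' :: ("and ".toList ++ pvSmallB (c % 100)) else []) := by
  have hq : pvChQ c = [(c / 100, "Hundred".toList)] := by
    unfold pvChQ
    rw [if_neg (by omega), if_neg (by omega), if_neg (by omega), if_pos (by omega)]
    have : c % 1000 = c := Nat.mod_eq_of_lt h2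
    rw [this]
    rfl
  rw [pvCanon_eq c (by omega), hq]
  have hch : pvCanon (c / 100) = pvW (c / 100) := pvCanon_low _ (by omega)
  simp only [List.map_cons, List.map_nil, hch]
  by_cases hc0 : c % 100 = 0
  · simp [hc0, pvJoin, PySem.Chars.join_singleton]
  · have hq' : ([(c / 100, "Hundred".toList)] : List (Nat × List Char)) ≠ [] := by simp
    simp only [ne_eq, hc0, not_false_eq_true, if_pos, if_neg hq']
    rw [List.singleton_append, pvJoin_cons _ _ (by simp)]
    simp [pvJoin, PySem.Chars.join_singleton, List.append_assoc]

lemma pvTLand3 : ("and" : String).toList = ['a', 'n', 'd'] := by decide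

-- the crore token group
def pvTokC (C : Nat) : List (List Char) :=
  (if ¬C / 100 = 0 then
     [pvW (C / 100), "Hundred".toList] ++ (if ¬C % 100 = 0 then ["and".toList] else [])
   else []) ++ pvPairN (C % 100) ++ ["Crore".toList]

lemma pvJoin_tokC (C : Nat) (h1 : 1 ≤ C) (h2 : C < 1000) :
    pvJoin (pvTokC C) = pvCanon C ++ ' ' :: "Crore".toList := by
  unfold pvTokC
  by_cases hch : C / 100 = 0
  · have hC100 : C % 100 = C := by omega
    rw [if_neg (by omega), hC100, pvCanon_small C h1 (by omega), List.nil_append,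
      pvJoin_append _ _ (by simp), if_neg (pvPairN_ne C (by omega)),
      pvJoin_pvPairN C (by omega) (by omega)]
    simp [pvJoin, PySem.Chars.join_singleton]
  · rw [if_pos (by omega), pvCanon_mid C (by omega) h2]
    by_cases hc2 : C % 100 = 0
    · rw [if_neg (by omega), if_neg (by omega)]
      have hpn : pvPairN (C % 100) = [] := by rw [hc2]; rfl
      simp only [hpn, List.append_nil, List.nil_append]
      rw [show ([pvW (C / 100), "Hundred".toList] ++ ["Crore".toList])
          = pvW (C / 100) :: "Hundred".toList :: ["Crore".toList] from by simp]
      rw [pvJoin_cons _ _ (by simp), pvJoin_cons _ _ (by simp)]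
      simp [pvJoin, PySem.Chars.join_singleton, List.append_assoc]
    · rw [if_pos (by omega), if_pos (by omega)]
      have hpne : pvPairN (C % 100) ≠ [] := pvPairN_ne _ hc2
      have htail : pvJoin (pvPairN (C % 100) ++ ["Crore".toList])
          = pvSmallB (C % 100) ++ ' ' :: "Crore".toList := by
        rw [pvJoin_append _ _ (by simp), if_neg hpne,
          pvJoin_pvPairN (C % 100) hc2 (by omega)]
        simp [pvJoin, PySem.Chars.join_singleton]
      rw [List.append_assoc, List.append_assoc]
      rw [show ([pvW (C / 100), "Hundred".toList] ++ (["and".toList] ++ (pvPairN (C % 100) ++ ["Crore".toList])))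
          = pvW (C / 100) :: "Hundred".toList :: "and".toList :: (pvPairN (C % 100) ++ ["Crore".toList]) from by simp]
      rw [pvJoin_cons _ _ (by simp), pvJoin_cons _ _ (by simp),
        pvJoin_cons _ _ (by simp [hpne]), htail]
      simp [pvTLand, pvTLand3, List.append_assoc]

lemma pvChQ_groups (n : Nat) :
    pvChQ n = (if ¬n / 10000000 = 0 then [(n / 10000000, "Crore".toList)] else []) ++
      (if ¬n / 100000 % 100 = 0 then [(n / 100000 % 100, "Lakh".toList)] else []) ++
      (if ¬n / 1000 % 100 = 0 then [(n / 1000 % 100, "Thousand".toList)] else []) ++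
      (if ¬n / 100 % 10 = 0 then [(n / 100 % 10, "Hundred".toList)] else []) := by
  unfold pvChQ
  simp only [show (10000000 ≤ n) ↔ (¬n / 10000000 = 0) from by omega,
    show (100000 ≤ n % 10000000) ↔ (¬n / 100000 % 100 = 0) from by omega,
    show (1000 ≤ n % 100000) ↔ (¬n / 1000 % 100 = 0) from by omega,
    show (100 ≤ n % 1000) ↔ (¬n / 100 % 10 = 0) from by omega,
    show n % 10000000 / 100000 = n / 100000 % 100 from by omega,
    show n % 100000 / 1000 = n / 1000 % 100 from by omega,
    show n % 1000 / 100 = n / 100 % 10 from by omega]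

-- the flat token pass of port B equals the canonical form on the 32-bit range
lemma pvAltEq (n : Nat) (hm : n ≤ 2147483648) :
    (convert_to_indian_rupees_alt (n : Int)).toList = pvCanon n := by
  by_cases h20 : n < 20
  · have hi : (n : Int) < 20 := by exact_mod_cast h20
    rw [convert_to_indian_rupees_alt.eq_def, if_pos hi, pvUnits_eq' n h20, pvCanon_low n h20]
  · have hi : ¬ ((n : Int) < 20) := by push_cast; omega
    have eC : PySem.Int.floordiv (n : Int) 10000000 = ((n / 10000000 : Nat) : Int) := by
      rw [PySem.Int.floordiv_eq_ediv_of_pos (by norm_num)]; norm_cast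
    have eL : PySem.Int.mod (PySem.Int.floordiv (n : Int) 100000) 100
        = ((n / 100000 % 100 : Nat) : Int) := by
      rw [PySem.Int.floordiv_eq_ediv_of_pos (by norm_num),
        PySem.Int.mod_eq_emod_of_pos (by norm_num)]; norm_cast
    have eT : PySem.Int.mod (PySem.Int.floordiv (n : Int) 1000) 100
        = ((n / 1000 % 100 : Nat) : Int) := by
      rw [PySem.Int.floordiv_eq_ediv_of_pos (by norm_num),
        PySem.Int.mod_eq_emod_of_pos (by norm_num)]; norm_cast
    have eH : PySem.Int.mod (PySem.Int.floordiv (n : Int) 100) 10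
        = ((n / 100 % 10 : Nat) : Int) := by
      rw [PySem.Int.floordiv_eq_ediv_of_pos (by norm_num),
        PySem.Int.mod_eq_emod_of_pos (by norm_num)]; norm_cast
    have eR : PySem.Int.mod (n : Int) 100 = ((n % 100 : Nat) : Int) := by
      rw [PySem.Int.mod_eq_emod_of_pos (by norm_num)]; norm_cast
    have ech : PySem.Int.floordiv ((n / 10000000 : Nat) : Int) 100
        = ((n / 10000000 / 100 : Nat) : Int) := by
      rw [PySem.Int.floordiv_eq_ediv_of_pos (by norm_num)]; norm_cast
    have ec2 : PySem.Int.mod ((n / 10000000 : Nat) : Int) 100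
        = ((n / 10000000 % 100 : Nat) : Int) := by
      rw [PySem.Int.mod_eq_emod_of_pos (by norm_num)]; norm_cast
    simp only [convert_to_indian_rupees_alt, if_neg hi]
    rw [eC, eL, eT, eH, eR, ech, ec2]
    rw [PySem.Str.toList_join, pvTLspace]
    simp only [ne_eq, Int.natCast_eq_zero, List.map_append, List.map_cons, List.map_nil,
      apply_ite (List.map String.toList),
      pvPair_toList' (n / 10000000 % 100) (by omega),
      pvPair_toList' (n / 100000 % 100) (by omega),
      pvPair_toList' (n / 1000 % 100) (by omega),
      pvPair_toList' (n % 100) (by omega),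
      pvUnits_eq' (n / 10000000 / 100) (by omega),
      pvUnits_eq' (n / 100 % 10) (by omega)]
    -- replace the opaque "words is nonempty" test by the equivalent digit-group condition
    have hW4iff : (¬((((if ¬n / 10000000 = 0 then
              (if ¬n / 10000000 / 100 = 0 then
                    [(PySem.List.pyGet? pvUnits ((n / 10000000 / 100 : Nat) : Int)).getD "", "Hundred"] ++
                      if ¬n / 10000000 % 100 = 0 then ["and"] else []
                  else []) ++
                  pvPair ((n / 10000000 % 100 : Nat) : Int) ++
                ["Crore"]
            else []) ++
            if ¬n / 100000 % 100 = 0 then pvPair ((n / 100000 % 100 : Nat) : Int) ++ ["Lakh"] else []) ++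
          if ¬n / 1000 % 100 = 0 then pvPair ((n / 1000 % 100 : Nat) : Int) ++ ["Thousand"] else []) ++
        if ¬n / 100 % 10 = 0 then [(PySem.List.pyGet? pvUnits ((n / 100 % 10 : Nat) : Int)).getD "", "Hundred"]
        else []) = ([] : List String))
        ↔ ¬(n / 10000000 = 0 ∧ n / 100000 % 100 = 0 ∧ n / 1000 % 100 = 0 ∧ n / 100 % 10 = 0) := by
      rw [not_iff_not]
      by_cases c1 : n / 10000000 = 0 <;> by_cases c2 : n / 100000 % 100 = 0 <;>
        by_cases c3 : n / 1000 % 100 = 0 <;> by_cases c4 : n / 100 % 10 = 0 <;>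
        simp [c1, c2, c3, c4]
    simp only [hW4iff]
    -- pull the final group out of the conditionals
    have pull : ∀ (M A B : List (List Char)) (c : Prop) (inst : Decidable c),
        ((@ite _ c inst (M ++ A) M) ++ B) = M ++ ((@ite _ c inst A []) ++ B) := by
      intro M A B c inst
      split_ifs <;> simp
    have pull2 : ∀ (M X : List (List Char)) (c : Prop) (inst : Decidable c),
        (@ite _ c inst (M ++ X) M) = M ++ (@ite _ c inst X []) := by
      intro M X c inst
      split_ifs <;> simp
    rw [pull, pull2]
    -- fold the crore token group
    rw [show ((if ¬n / 10000000 / 100 = 0 then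
            [pvW (n / 10000000 / 100), "Hundred".toList] ++
              if ¬n / 10000000 % 100 = 0 then ["and".toList] else []
          else []) ++ pvPairN (n / 10000000 % 100) ++ ["Crore".toList])
        = pvTokC (n / 10000000) from rfl]
    -- regroup the token list as a flatten of the five nonempty groups
    have unflat : ∀ (tok : List (List Char)) (c : Prop) (inst : Decidable c),
        (@ite _ c inst tok []) = List.flatten (@ite _ c inst [tok] []) := by
      intro tok c inst
      split_ifs <;> simp
    rw [unflat (c := ¬n % 100 = 0), unflat (c := ¬n / 10000000 = 0),
      unflat (c := ¬n / 100000 % 100 = 0), unflat (c := ¬n / 1000 % 100 = 0),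
      unflat (c := ¬n / 100 % 10 = 0)]
    simp only [← List.flatten_append]
    have jdef : ∀ x, PySem.Chars.join [' '] x = pvJoin x := fun _ => rfl
    rw [jdef]
    refine (pvJoin_flatten _ ?_).trans ?_
    · -- every group is nonempty
      have mem_ite : ∀ (g tok : List (List Char)) (c : Prop) (inst : Decidable c),
          g ∈ (@ite _ c inst [tok] ([] : List (List (List Char)))) → g = tok ∧ c := by
        intro g tok c inst hgm
        split_ifs at hgm with hc
        · exact ⟨List.mem_singleton.mp hgm, hc⟩
        · simp at hgm
      intro g hg
      simp only [List.mem_append] at hg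
      rcases hg with ((((hg | hg) | hg) | hg) | hg)
      · obtain ⟨rfl, _⟩ := mem_ite _ _ _ _ hg
        simp [pvTokC]
      · obtain ⟨rfl, _⟩ := mem_ite _ _ _ _ hg
        simp
      · obtain ⟨rfl, _⟩ := mem_ite _ _ _ _ hg
        simp
      · obtain ⟨rfl, _⟩ := mem_ite _ _ _ _ hg
        simp
      · obtain ⟨rfl, hc⟩ := mem_ite _ _ _ _ hg
        intro heq
        exact pvPairN_ne (n % 100) hc (List.append_eq_nil_iff.mp heq).2
    · -- joined groups equal the canonical phrases
      simp only [List.map_append, apply_ite (List.map pvJoin), List.map_cons, List.map_nil]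
      have hPQ : (pvChQ n = []) ↔
          (n / 10000000 = 0 ∧ n / 100000 % 100 = 0 ∧ n / 1000 % 100 = 0 ∧ n / 100 % 10 = 0) := by
        rw [pvChQ_groups]
        by_cases c1 : n / 10000000 = 0 <;> by_cases c2 : n / 100000 % 100 = 0 <;>
          by_cases c3 : n / 1000 % 100 = 0 <;> by_cases c4 : n / 100 % 10 = 0 <;>
          simp [c1, c2, c3, c4]
      have hgC2 : (if ¬n / 10000000 = 0 then [pvJoin (pvTokC (n / 10000000))]
            else ([] : List (List Char)))
          = (if ¬n / 10000000 = 0 then [pvCanon (n / 10000000) ++ ' ' :: "Crore".toList] else []) := by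
        split_ifs with h
        · rfl
        · rw [pvJoin_tokC (n / 10000000) (by omega) (by omega)]
      have hgL2 : (if ¬n / 100000 % 100 = 0 then [pvJoin (pvPairN (n / 100000 % 100) ++ ["Lakh".toList])]
            else ([] : List (List Char)))
          = (if ¬n / 100000 % 100 = 0 then [pvCanon (n / 100000 % 100) ++ ' ' :: "Lakh".toList] else []) := by
        split_ifs with h
        · rfl
        · rw [pvJoin_append _ _ (by simp), if_neg (pvPairN_ne _ h), pvJoin_pvPairN _ h (by omega),
            pvCanon_small _ (by omega) (by omega)]
          simp [pvJoin, PySem.Chars.join_singleton]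
      have hgT2 : (if ¬n / 1000 % 100 = 0 then [pvJoin (pvPairN (n / 1000 % 100) ++ ["Thousand".toList])]
            else ([] : List (List Char)))
          = (if ¬n / 1000 % 100 = 0 then [pvCanon (n / 1000 % 100) ++ ' ' :: "Thousand".toList] else []) := by
        split_ifs with h
        · rfl
        · rw [pvJoin_append _ _ (by simp), if_neg (pvPairN_ne _ h), pvJoin_pvPairN _ h (by omega),
            pvCanon_small _ (by omega) (by omega)]
          simp [pvJoin, PySem.Chars.join_singleton]
      have hgH2 : (if ¬n / 100 % 10 = 0 then [pvJoin [pvW (n / 100 % 10), "Hundred".toList]]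
            else ([] : List (List Char)))
          = (if ¬n / 100 % 10 = 0 then [pvCanon (n / 100 % 10) ++ ' ' :: "Hundred".toList] else []) := by
        split_ifs with h
        · rfl
        · rw [pvCanon_low (n / 100 % 10) (by omega), pvJoin_cons _ _ (by simp)]
          simp [pvJoin, PySem.Chars.join_singleton]
      have hgR2 : (if ¬n % 100 = 0 then
            [pvJoin ((if ¬(n / 10000000 = 0 ∧ n / 100000 % 100 = 0 ∧ n / 1000 % 100 = 0 ∧ n / 100 % 10 = 0)
                then ["and".toList] else []) ++ pvPairN (n % 100))]
            else ([] : List (List Char)))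
          = (if ¬n % 100 = 0 then
            [(if pvChQ n = [] then [] else "and ".toList) ++ pvSmallB (n % 100)] else []) := by
        by_cases h : n % 100 = 0
        · simp only [if_neg (not_not_intro h)]
        · simp only [if_pos h]
          congr 1
          by_cases hc4 : n / 10000000 = 0 ∧ n / 100000 % 100 = 0 ∧ n / 1000 % 100 = 0 ∧ n / 100 % 10 = 0
          · rw [if_neg (not_not_intro hc4), if_pos (hPQ.mpr hc4), List.nil_append,
              pvJoin_pvPairN _ h (by omega), List.nil_append]
          · rw [if_pos hc4, if_neg (fun hh => hc4 (hPQ.mp hh)), List.singleton_append,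
              pvJoin_cons _ _ (pvPairN_ne _ h), pvJoin_pvPairN _ h (by omega)]
            simp [pvTLand, pvTLand3]
      rw [hgC2, hgL2, hgT2, hgH2, hgR2, pvCanon_eq n (by omega)]
      have hmapQ : (pvChQ n).map (fun p => pvCanon p.1 ++ ' ' :: p.2)
          = (if ¬n / 10000000 = 0 then [pvCanon (n / 10000000) ++ ' ' :: "Crore".toList] else []) ++
            (if ¬n / 100000 % 100 = 0 then [pvCanon (n / 100000 % 100) ++ ' ' :: "Lakh".toList] else []) ++
            (if ¬n / 1000 % 100 = 0 then [pvCanon (n / 1000 % 100) ++ ' ' :: "Thousand".toList] else []) ++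
            (if ¬n / 100 % 10 = 0 then [pvCanon (n / 100 % 10) ++ ' ' :: "Hundred".toList] else []) := by
        rw [pvChQ_groups]
        simp only [List.map_append, List.map_cons, List.map_nil,
          apply_ite (List.map (fun p : Nat × List Char => pvCanon p.1 ++ ' ' :: p.2))]
      rw [hmapQ]

-- ===== VERDICT (by name: the statement is the Claim_ definition above) =====
theorem convert_to_indian_rupees_spec : Claim_equal_convert_to_indian_rupees := by
  intro number hdom hpre
  unfold Spec_convert_to_indian_rupees
  have hb : number ≤ 2147483648 := by
    unfold Dom_convert_to_indian_rupees pvDomInt at hdom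
    simp only [decide_eq_true_eq] at hdom
    exact hdom.2
  obtain ⟨m, rfl⟩ : ∃ m : Nat, number = (m : Int) :=
    ⟨number.toNat, (Int.toNat_of_nonneg hpre).symm⟩
  have hm : m ≤ 2147483648 := by exact_mod_cast hb
  rw [← String.toList_inj, pvMain m, pvAltEq m hm]
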